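-- pv_equiv track=rewrite | github.com/devclub-iitd/ClassGrid | server/app/utils/get_lh.py | get_table_number
-- ===== SOURCE A (Python) =====
-- def get_table_number(page_text, course_code, _type):
--     items = page_text.split('\n')[1:]
--     checkpoint = -1
--     for i in items:
--         if i.startswith('Room'):
--             checkpoint += 1
--         if course_code.upper() in i:
--             return checkpoint
--     return None
-- ===== SOURCE B (Python) =====
-- def get_table_number(page_text, course_code, _type):
--     lines = page_text.split('\n')[1:]
--     code = course_code.upper()
--     idx = next((k for k, line in enumerate(lines) if code in line), None)
--     if idx is None:
--         return None
--     return sum(1 for line in lines[:idx + 1] if line.startswith('Room')) - 1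
-- ===== Notes on version B (the rewrite author's own statement) =====
-- stated objective: alternative
-- what changed: Replaces the single interleaved counter-and-search loop by a locate pass (first enumerate index whose line contains the code) followed by a tally pass counting 'Room'-prefixed lines in the inclusive prefix, minus 1.
import Mathlib
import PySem

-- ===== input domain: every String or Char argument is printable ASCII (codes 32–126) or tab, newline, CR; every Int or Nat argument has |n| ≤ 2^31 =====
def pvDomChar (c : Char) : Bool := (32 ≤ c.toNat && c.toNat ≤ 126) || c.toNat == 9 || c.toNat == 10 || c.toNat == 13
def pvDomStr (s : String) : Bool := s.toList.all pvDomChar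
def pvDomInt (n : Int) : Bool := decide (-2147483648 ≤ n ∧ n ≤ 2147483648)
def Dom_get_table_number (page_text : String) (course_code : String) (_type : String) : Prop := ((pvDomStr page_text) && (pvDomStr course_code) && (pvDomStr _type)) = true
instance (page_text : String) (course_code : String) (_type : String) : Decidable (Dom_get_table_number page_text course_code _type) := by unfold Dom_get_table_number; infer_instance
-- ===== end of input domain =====

-- B replaces A's interleaved counter-and-search loop by a locate pass then a tally pass (alternative decomposition, same cost).

-- ===== PORT A =====
-- the for-loop over items with the running 'checkpoint' counter
def pvLoopA (code : String) : List String → Int → Option Int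
  | [], _ => none
  | i :: rest, checkpoint =>
    let checkpoint := if PySem.Str.startswith i "Room" then checkpoint + 1 else checkpoint
    if PySem.Str.isIn code i then some checkpoint
    else pvLoopA code rest checkpoint

def get_table_number (page_text : String) (course_code : String) (_type : String) : Option Int :=
  -- page_text.split('\n')[1:]  — the separator "\n" is nonempty, so split? returns some; getD [] is exact
  let items := ((PySem.Str.split? page_text "\n").getD []).drop 1
  pvLoopA (PySem.Str.upper course_code) items (-1)

-- ===== PORT B =====
def get_table_number_alt (page_text : String) (course_code : String) (_type : String) : Option Int :=
  let lines := ((PySem.Str.split? page_text "\n").getD []).drop 1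
  let code := PySem.Str.upper course_code
  -- next((k for k, line in enumerate(lines) if code in line), None)
  match lines.findIdx? (fun line => PySem.Str.isIn code line) with
  | none => none
  | some idx =>
    -- sum(1 for line in lines[:idx+1] if line.startswith('Room')) - 1
    some ((((lines.take (idx + 1)).filter (fun line => PySem.Str.startswith line "Room")).length : Int) - 1)

-- ===== PRECONDITION & SPEC =====
def Spec_get_table_number (page_text : String) (course_code : String) (_type : String) (out : Option Int) : Prop := out = get_table_number_alt page_text course_code _type
instance (page_text : String) (course_code : String) (_type : String) (out : Option Int) : Decidable (Spec_get_table_number page_text course_code _type out) := by unfold Spec_get_table_number; infer_instance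

-- ===== CLAIM (what is proved, stated in full; the proofs are below) =====
def Claim_equal_get_table_number : Prop := ∀ (page_text : String) (course_code : String) (_type : String), Dom_get_table_number page_text course_code _type → Spec_get_table_number page_text course_code _type (get_table_number page_text course_code _type)

-- ===== LEMMAS AND PROOFS =====
-- A's loop from any counter value equals: locate the first matching line, then add the tally of
-- 'Room'-prefixed lines in the inclusive prefix.
theorem pvLoopA_eq (code : String) (ls : List String) (cp : Int) :
    pvLoopA code ls cp =
      (ls.findIdx? (fun line => PySem.Str.isIn code line)).map
        (fun k => cp + (((ls.take (k + 1)).filter (fun line => PySem.Str.startswith line "Room")).length : Int)) := by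
  induction ls generalizing cp with
  | nil => rfl
  | cons l rest ih =>
    simp only [pvLoopA, List.findIdx?_cons]
    cases hp : PySem.Str.isIn code l <;> cases hr : PySem.Str.startswith l "Room" <;>
      simp only [hp, hr, if_true, if_false, Bool.false_eq_true, Bool.true_eq_false, ite_true,
        ite_false, ih, Option.map_map, List.take_succ_cons, List.filter_cons_of_pos,
        List.filter_cons_of_neg, List.length_cons, Option.map_some, List.take_zero,
        Nat.zero_add, Function.comp] <;>
      first
        | rfl
        | (congr 1; funext k; simp only [Function.comp_apply];
           first
             | rfl
             | (rw [List.filter_cons_of_neg (by simpa using hr)])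
             | (push_cast; ring))
        | (rw [List.filter_cons_of_neg (by simpa using hr)]; simp)

-- ===== VERDICT (by name: the statement is the Claim_ definition above) =====
theorem get_table_number_spec : Claim_equal_get_table_number := by
  intro page_text course_code _type _
  unfold Spec_get_table_number get_table_number get_table_number_alt
  simp only [pvLoopA_eq]
  cases ((PySem.Str.split? page_text "\n").getD []).drop 1 |>.findIdx?
      (fun line => PySem.Str.isIn (PySem.Str.upper course_code) line) with
  | none => rfl
  | some k => simp; ring
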